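-- pv_equiv track=rewrite | github.com/lautaroboninom/sistema_de_ventas_las_chulas | scripts/import_magnamed_price_list.py | _join_pieces
-- ===== SOURCE A (Python) =====
-- def _join_pieces(pieces: list[str]) -> str:
--     out = ""
--     for piece in pieces:
--         piece = piece.strip()
--         if not piece:
--             continue
--         if out.endswith("-"):
--             out = out[:-1] + piece.lstrip()
--         elif out:
--             out += " " + piece
--         else:
--             out = piece
--     return " ".join(out.split())
-- ===== SOURCE B (Python) =====
-- def _join_pieces(pieces: list[str]) -> str:
--     words = []
--     for piece in pieces:
--         pw = piece.split()
--         if not pw: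
--             continue
--         if words and words[-1].endswith("-"):
--             words[-1] = words[-1][:-1] + pw[0]
--             words.extend(pw[1:])
--         else:
--             words.extend(pw)
--     return " ".join(words)
-- ===== Notes on version B (the rewrite author's own statement) =====
-- stated objective: simpler
-- what changed: B tokenizes each piece into words and merges a trailing hyphen at word granularity in a word list, instead of A's growing accumulator string that is sliced/concatenated per piece and re-split at the end.
import Mathlib
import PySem

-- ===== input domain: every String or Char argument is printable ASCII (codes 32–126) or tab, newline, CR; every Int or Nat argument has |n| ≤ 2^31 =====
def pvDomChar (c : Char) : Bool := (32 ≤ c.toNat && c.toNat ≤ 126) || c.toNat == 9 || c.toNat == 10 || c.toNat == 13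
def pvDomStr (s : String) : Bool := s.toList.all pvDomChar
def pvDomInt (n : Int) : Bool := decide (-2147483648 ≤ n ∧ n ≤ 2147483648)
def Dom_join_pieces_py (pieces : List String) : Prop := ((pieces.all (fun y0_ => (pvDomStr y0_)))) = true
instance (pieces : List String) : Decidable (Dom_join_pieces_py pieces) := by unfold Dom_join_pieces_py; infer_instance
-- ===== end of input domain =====

-- B re-implements the hyphen-merging joiner at word granularity (a word list instead of a growing
-- accumulator string re-split at the end); objective: simpler.

-- ===== PORT A =====
-- one loop iteration of A: out is the accumulator string (as List Char)
def pvStepA (out : List Char) (piece : List Char) : List Char :=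
  let p := PySem.Chars.strip piece                        -- piece = piece.strip()
  if p.isEmpty then out                                   -- if not piece: continue
  else if PySem.Chars.endswith out ['-'] then
    out.dropLast ++ PySem.Chars.lstrip p                  -- out = out[:-1] + piece.lstrip()  (xs[:-1] = dropLast, exact also for empty)
  else if !out.isEmpty then out ++ ' ' :: p               -- out += " " + piece
  else p                                                  -- out = piece

def join_pieces_py (pieces : List String) : String :=
  String.ofList (PySem.Chars.join [' ']
    (PySem.Chars.split₀ (pieces.foldl (fun out piece => pvStepA out piece.toList) [])))
    -- return " ".join(out.split())

-- ===== PORT B =====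
-- one loop iteration of B: words is the word list
def pvStepB (words : List (List Char)) (piece : List Char) : List (List Char) :=
  let pw := PySem.Chars.split₀ piece                      -- pw = piece.split()
  if pw.isEmpty then words                                -- if not pw: continue
  else if !words.isEmpty && PySem.Chars.endswith (words.getLastD []) ['-'] then
    -- words[-1] = words[-1][:-1] + pw[0]; words.extend(pw[1:])   (words[-1] under the nonempty guard; [: -1] = dropLast, pw[1:] = tail)
    words.dropLast ++ ((words.getLastD []).dropLast ++ pw.headD []) :: pw.tail
  else words ++ pw                                        -- words.extend(pw)

def join_pieces_py_alt (pieces : List String) : String :=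
  String.ofList (PySem.Chars.join [' ']
    (pieces.foldl (fun words piece => pvStepB words piece.toList) []))
    -- return " ".join(words)

-- ===== PRECONDITION & SPEC =====
def Spec_join_pieces_py (pieces : List String) (out : String) : Prop := out = join_pieces_py_alt pieces
instance (pieces : List String) (out : String) : Decidable (Spec_join_pieces_py pieces out) := by unfold Spec_join_pieces_py; infer_instance

-- ===== CLAIM (what is proved, stated in full; the proofs are below) =====
def Claim_equal_join_pieces_py : Prop := ∀ (pieces : List String), Dom_join_pieces_py pieces → Spec_join_pieces_py pieces (join_pieces_py pieces)

-- ===== LEMMAS AND PROOFS =====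

-- split₀.go as a fold: state = (current word reversed, finished words reversed)
def pvStep (s : List Char × List (List Char)) (c : Char) : List Char × List (List Char) :=
  if PySem.Chars.isspace c then ([], if s.1.isEmpty then s.2 else s.1.reverse :: s.2)
  else (c :: s.1, s.2)

def pvFinish (s : List Char × List (List Char)) : List (List Char) :=
  if s.1.isEmpty then s.2.reverse else (s.1.reverse :: s.2).reverse

-- glue a pending (already reversed back) word fragment onto the first word of a word list
def pvGlue (u : List Char) (ws : List (List Char)) : List (List Char) :=
  match ws with
  | [] => if u.isEmpty then [] else [u]
  | w :: t => (u ++ w) :: t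

theorem pv_go_eq (cs : List Char) : ∀ cur acc,
    PySem.Chars.split₀.go cs cur acc = pvFinish (cs.foldl pvStep (cur, acc)) := by
  induction cs with
  | nil => intro cur acc; simp [PySem.Chars.split₀.go, pvFinish]
  | cons c rest ih =>
      intro cur acc
      by_cases h : PySem.Chars.isspace c
      · have hgo : PySem.Chars.split₀.go (c :: rest) cur acc =
            if cur.isEmpty then PySem.Chars.split₀.go rest [] acc
            else PySem.Chars.split₀.go rest [] (cur.reverse :: acc) := by
          simp [PySem.Chars.split₀.go, h]
        rw [hgo]
        by_cases hc : cur.isEmpty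
        · rw [if_pos hc, ih]
          simp [pvStep, h, hc]
        · rw [if_neg hc, ih]
          simp [pvStep, h, hc]
      · simp [PySem.Chars.split₀.go, pvStep, h, ih]

theorem pv_split₀_eq (cs : List Char) :
    PySem.Chars.split₀ cs = pvFinish (cs.foldl pvStep ([], [])) := pv_go_eq cs [] []

theorem pv_acc (cs : List Char) : ∀ cur acc,
    cs.foldl pvStep (cur, acc) =
      ((cs.foldl pvStep (cur, [])).1, (cs.foldl pvStep (cur, [])).2 ++ acc) := by
  induction cs with
  | nil => intro cur acc; rfl
  | cons c rest ih =>
      intro cur acc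
      by_cases h : PySem.Chars.isspace c
      · by_cases hc : cur.isEmpty
        · have h1 : pvStep (cur, acc) c = ([], acc) := by simp [pvStep, h, hc]
          have h2 : pvStep (cur, []) c = ([], []) := by simp [pvStep, h, hc]
          simp only [List.foldl_cons, h1, h2]
          exact ih [] acc
        · have h1 : pvStep (cur, acc) c = ([], cur.reverse :: acc) := by simp [pvStep, h, hc]
          have h2 : pvStep (cur, []) c = ([], [cur.reverse]) := by simp [pvStep, h, hc]
          simp only [List.foldl_cons, h1, h2]
          rw [ih [] (cur.reverse :: acc), ih [] [cur.reverse]]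
          simp
      · have h1 : pvStep (cur, acc) c = (c :: cur, acc) := by simp [pvStep, h]
        have h2 : pvStep (cur, []) c = (c :: cur, []) := by simp [pvStep, h]
        simp only [List.foldl_cons, h1, h2]
        exact ih (c :: cur) acc

theorem pv_finish_acc (cs : List Char) (cur : List Char) (acc : List (List Char)) :
    pvFinish (cs.foldl pvStep (cur, acc)) = acc.reverse ++ pvFinish (cs.foldl pvStep (cur, [])) := by
  rw [pv_acc]
  unfold pvFinish
  split_ifs <;> simp

theorem pv_carry (cs : List Char) : ∀ cur,
    pvFinish (cs.foldl pvStep (cur, [])) =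
      match cs with
      | [] => if cur.isEmpty then [] else [cur.reverse]
      | c :: _ =>
          if PySem.Chars.isspace c then
            (if cur.isEmpty then [] else [cur.reverse]) ++ PySem.Chars.split₀ cs
          else pvGlue cur.reverse (PySem.Chars.split₀ cs) := by
  induction cs with
  | nil => intro cur; simp [pvFinish]
  | cons c rest ih =>
      intro cur
      by_cases h : PySem.Chars.isspace c
      · have hs : PySem.Chars.split₀ (c :: rest) = PySem.Chars.split₀ rest := by
          simp [PySem.Chars.split₀, PySem.Chars.split₀.go, h]
        simp only [h, if_true, hs]
        have : (c :: rest).foldl pvStep (cur, []) =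
            rest.foldl pvStep ([], if cur.isEmpty then [] else [cur.reverse]) := by
          simp [pvStep, h]
        rw [this, pv_finish_acc, pv_split₀_eq]
        by_cases hc : cur.isEmpty <;> simp [hc]
      · -- split₀ (c :: rest) in terms of the state ([c], [])
        have hs : PySem.Chars.split₀ (c :: rest) = pvFinish (rest.foldl pvStep ([c], [])) := by
          rw [pv_split₀_eq]
          simp [pvStep, h]
        have hl : (c :: rest).foldl pvStep (cur, []) = rest.foldl pvStep (c :: cur, []) := by
          simp [pvStep, h]
        simp only [h, hl, hs]
        rw [ih (c :: cur), ih [c]]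
        cases rest with
        | nil => simp [pvGlue]
        | cons d t =>
            by_cases hd : PySem.Chars.isspace d
            · simp [hd, pvGlue]
            · simp only [hd]
              cases hw : PySem.Chars.split₀ (d :: t) with
              | nil => simp [pvGlue]
              | cons w ws => simp [pvGlue]

theorem pv_split₀_append_space (x : List Char) (c : Char) (h : PySem.Chars.isspace c = true) :
    PySem.Chars.split₀ (x ++ [c]) = PySem.Chars.split₀ x := by
  rw [pv_split₀_eq, pv_split₀_eq, List.foldl_append]
  rcases hx : x.foldl pvStep ([], []) with ⟨cur, acc⟩
  by_cases hc : cur.isEmpty <;> simp [pvStep, pvFinish, h, hc]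

theorem pv_split₀_append_spaces (t : List Char) (h : ∀ c ∈ t, PySem.Chars.isspace c = true) :
    ∀ x, PySem.Chars.split₀ (x ++ t) = PySem.Chars.split₀ x := by
  induction t with
  | nil => simp
  | cons c t ih =>
      intro x
      have : x ++ c :: t = (x ++ [c]) ++ t := by simp
      rw [this, ih (fun d hd => h d (List.mem_cons_of_mem _ hd)),
        pv_split₀_append_space x c (h c (List.mem_cons_self ..))]

theorem pv_split₀_sep (a b : List Char) :
    PySem.Chars.split₀ (a ++ ' ' :: b) = PySem.Chars.split₀ a ++ PySem.Chars.split₀ b := by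
  rw [pv_split₀_eq, List.foldl_append]
  rcases ha : a.foldl pvStep ([], []) with ⟨cur, acc⟩
  have hsp : PySem.Chars.isspace ' ' = true := by decide
  have : (' ' :: b).foldl pvStep (cur, acc) =
      b.foldl pvStep ([], if cur.isEmpty then acc else cur.reverse :: acc) := by
    simp [pvStep, hsp]
  rw [this, pv_finish_acc, ← pv_split₀_eq, pv_split₀_eq a, ha]
  by_cases hc : cur.isEmpty <;> simp [pvFinish, hc]

theorem pv_split₀_append_word (q : List Char) (c : Char) (rest : List Char)
    (h : PySem.Chars.isspace c = false) :
    PySem.Chars.split₀ (q ++ c :: rest) =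
      (q.foldl pvStep ([], [])).2.reverse ++
        pvGlue (q.foldl pvStep ([], [])).1.reverse (PySem.Chars.split₀ (c :: rest)) := by
  rw [pv_split₀_eq, List.foldl_append]
  rcases hq : q.foldl pvStep ([], []) with ⟨cur, acc⟩
  rw [pv_finish_acc, pv_carry]
  simp [h]

theorem pv_split₀_snoc (q : List Char) (c : Char) (h : PySem.Chars.isspace c = false) :
    PySem.Chars.split₀ (q ++ [c]) =
      (q.foldl pvStep ([], [])).2.reverse ++
        [(q.foldl pvStep ([], [])).1.reverse ++ [c]] := by
  rw [pv_split₀_append_word q c [] h]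
  have h1 : PySem.Chars.split₀ [c] = [[c]] := by
    simp [PySem.Chars.split₀, PySem.Chars.split₀.go, h]
  rw [h1]
  simp [pvGlue]

theorem pv_split₀_cons_nonspace_ne (c : Char) (rest : List Char)
    (h : PySem.Chars.isspace c = false) : PySem.Chars.split₀ (c :: rest) ≠ [] := by
  rw [pv_split₀_eq]
  have hl : (c :: rest).foldl pvStep ([], []) = rest.foldl pvStep ([c], []) := by
    simp [pvStep, h]
  rw [hl, pv_carry]
  cases rest with
  | nil => simp
  | cons d t =>
      by_cases hd : PySem.Chars.isspace d
      · simp [hd]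
      · simp only [hd, Bool.false_eq_true, if_false]
        cases hw : PySem.Chars.split₀ (d :: t) <;> simp [pvGlue]

-- dropWhile facts
theorem pv_dropWhile_head (q : Char → Bool) : ∀ (l : List Char) (c : Char) (t : List Char),
    List.dropWhile q l = c :: t → q c = false := by
  intro l
  induction l with
  | nil => intro c t h; simp at h
  | cons a l ih =>
      intro c t h
      by_cases ha : q a
      · rw [List.dropWhile_cons_of_pos ha] at h; exact ih c t h
      · rw [List.dropWhile_cons_of_neg ha] at h
        cases h; simpa using ha

theorem pv_split₀_lstrip (p : List Char) :
    PySem.Chars.split₀ (PySem.Chars.lstrip p) = PySem.Chars.split₀ p := by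
  induction p with
  | nil => rfl
  | cons c t ih =>
      by_cases h : PySem.Chars.isspace c
      · have h1 : PySem.Chars.split₀ (c :: t) = PySem.Chars.split₀ t := by
          simp [PySem.Chars.split₀, PySem.Chars.split₀.go, h]
        have h2 : PySem.Chars.lstrip (c :: t) = PySem.Chars.lstrip t := by
          simp [PySem.Chars.lstrip, List.dropWhile_cons_of_pos h]
        rw [h1, h2, ih]
      · simp [PySem.Chars.lstrip, List.dropWhile_cons_of_neg h]

theorem pv_rstrip_decomp (p : List Char) :
    p = PySem.Chars.rstrip p ++ (List.takeWhile PySem.Chars.isspace p.reverse).reverse := by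
  unfold PySem.Chars.rstrip
  apply List.reverse_injective
  simp [List.takeWhile_append_dropWhile]

theorem pv_split₀_rstrip (p : List Char) :
    PySem.Chars.split₀ (PySem.Chars.rstrip p) = PySem.Chars.split₀ p := by
  conv_rhs => rw [pv_rstrip_decomp p]
  rw [pv_split₀_append_spaces]
  intro c hc
  rw [List.mem_reverse] at hc
  exact List.mem_takeWhile_imp hc

theorem pv_split₀_strip (p : List Char) :
    PySem.Chars.split₀ (PySem.Chars.strip p) = PySem.Chars.split₀ p := by
  unfold PySem.Chars.strip
  rw [pv_split₀_rstrip, pv_split₀_lstrip]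

-- rstrip is a prefix
theorem pv_rstrip_prefix (y : List Char) : PySem.Chars.rstrip y <+: y := by
  unfold PySem.Chars.rstrip
  obtain ⟨pre, hpre⟩ := List.dropWhile_suffix (p := PySem.Chars.isspace) (l := y.reverse)
  exact ⟨pre.reverse, by rw [← List.reverse_append, hpre, List.reverse_reverse]⟩

-- head/last of strip are non-space
theorem pv_strip_head (p : List Char) (c : Char) (t : List Char)
    (h : PySem.Chars.strip p = c :: t) : PySem.Chars.isspace c = false := by
  obtain ⟨r, hr⟩ := pv_rstrip_prefix (PySem.Chars.lstrip p)
  rw [show PySem.Chars.rstrip (PySem.Chars.lstrip p) = PySem.Chars.strip p from rfl, h] at hr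
  apply pv_dropWhile_head PySem.Chars.isspace p c (t ++ r)
  rw [show List.dropWhile PySem.Chars.isspace p = PySem.Chars.lstrip p from rfl, ← hr]
  simp

theorem pv_strip_last (p : List Char) (h : PySem.Chars.strip p ≠ []) :
    PySem.Chars.isspace ((PySem.Chars.strip p).getLastD ' ') = false := by
  cases hrev : (PySem.Chars.strip p).reverse with
  | nil => exact absurd (by simpa using hrev) h
  | cons c t =>
      have hd : List.dropWhile PySem.Chars.isspace (PySem.Chars.lstrip p).reverse = c :: t := by
        rw [← hrev]
        unfold PySem.Chars.strip PySem.Chars.rstrip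
        rw [List.reverse_reverse]
      have hc := pv_dropWhile_head PySem.Chars.isspace _ c t hd
      have hp : PySem.Chars.strip p = t.reverse ++ [c] := by
        rw [← (PySem.Chars.strip p).reverse_reverse, hrev]
        simp
      rw [hp, List.getLastD_concat]
      exact hc

theorem pv_lstrip_strip (p : List Char) :
    PySem.Chars.lstrip (PySem.Chars.strip p) = PySem.Chars.strip p := by
  cases h : PySem.Chars.strip p with
  | nil => rfl
  | cons c t =>
      unfold PySem.Chars.lstrip
      rw [List.dropWhile_cons_of_neg]
      simp [pv_strip_head p c t h]

theorem pv_strip_empty_iff (p : List Char) :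
    (PySem.Chars.strip p).isEmpty = (PySem.Chars.split₀ p).isEmpty := by
  cases h : PySem.Chars.strip p with
  | nil =>
      have h0 : PySem.Chars.split₀ p = [] := by rw [← pv_split₀_strip, h]; rfl
      simp [h0]
  | cons c t =>
      have hne : PySem.Chars.split₀ p ≠ [] := by
        rw [← pv_split₀_strip, h]
        exact pv_split₀_cons_nonspace_ne c t (pv_strip_head p c t h)
      cases hq : PySem.Chars.split₀ p with
      | nil => exact absurd hq hne
      | cons w ws => simp

theorem pv_endswith_nil : PySem.Chars.endswith [] ['-'] = false := by decide

theorem pv_endswith_concat (q : List Char) (c : Char) :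
    PySem.Chars.endswith (q ++ [c]) ['-'] = (c == '-') := by
  by_cases hc : c = '-'
  · subst hc
    have ht : PySem.Chars.endswith (q ++ ['-']) ['-'] = true :=
      (PySem.Chars.endswith_iff _ _).mpr ⟨q, rfl⟩
    simp [ht]
  · have hf : PySem.Chars.endswith (q ++ [c]) ['-'] = false := by
      apply Bool.eq_false_iff.mpr
      intro hsuf
      obtain ⟨r, hr⟩ := (PySem.Chars.endswith_iff _ _).mp hsuf
      have := congrArg (fun l => List.getLastD l ' ') hr
      simp only [List.getLastD_concat] at this
      exact hc this.symm
    rw [hf]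
    simp [hc]

-- getLastD over an append with a nonempty right part
theorem pv_getLastD_append (c : Char) (t : List Char) : ∀ (l₁ : List Char) (d : Char),
    (l₁ ++ c :: t).getLastD d = (c :: t).getLastD c := by
  intro l₁
  induction l₁ with
  | nil =>
      intro d
      cases hx : (c :: t).getLast? with
      | none => simp at hx
      | some x => simp [hx]
  | cons a l₁ ih =>
      intro d
      rw [List.cons_append, List.getLastD_cons, ih]

-- invariant on A's accumulator: empty or ends in a non-space character
def pvJ (out : List Char) : Prop :=
  out = [] ∨ PySem.Chars.isspace (out.getLastD ' ') = false

theorem pv_step_eq (out piece : List Char) (hJ : pvJ out) :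
    pvStepB (PySem.Chars.split₀ out) piece = PySem.Chars.split₀ (pvStepA out piece) ∧
      pvJ (pvStepA out piece) := by
  unfold pvJ at hJ ⊢
  by_cases hp : (PySem.Chars.strip piece).isEmpty
  · have hpw : (PySem.Chars.split₀ piece).isEmpty = true := by
      rw [← pv_strip_empty_iff]; exact hp
    constructor
    · simp only [pvStepA, pvStepB, hp, hpw, if_true]
    · simp only [pvStepA, hp, if_true]; exact hJ
  · have hp' : (PySem.Chars.strip piece).isEmpty = false := by simpa using hp
    have hpw : (PySem.Chars.split₀ piece).isEmpty = false := by
      rw [← pv_strip_empty_iff]; exact hp'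
    obtain ⟨c, tp, hstrip⟩ : ∃ c tp, PySem.Chars.strip piece = c :: tp := by
      cases h : PySem.Chars.strip piece with
      | nil => rw [h] at hp'; simp at hp'
      | cons c tp => exact ⟨c, tp, rfl⟩
    have hc : PySem.Chars.isspace c = false := pv_strip_head piece c tp hstrip
    obtain ⟨w, tw, hw⟩ : ∃ w tw, PySem.Chars.split₀ piece = w :: tw := by
      cases h : PySem.Chars.split₀ piece with
      | nil => rw [h] at hpw; simp at hpw
      | cons w tw => exact ⟨w, tw, rfl⟩
    have hsp' : PySem.Chars.split₀ (c :: tp) = w :: tw := by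
      rw [← hstrip, pv_split₀_strip, hw]
    have hlast : PySem.Chars.isspace ((PySem.Chars.strip piece).getLastD ' ') = false :=
      pv_strip_last piece (by rw [hstrip]; simp)
    by_cases he : PySem.Chars.endswith out ['-'] = true
    · rcases out.eq_nil_or_concat with rfl | ⟨q, ch, rfl⟩
      · rw [pv_endswith_nil] at he; cases he
      · simp only [List.concat_eq_append] at *
        have hch : ch = '-' := by
          rw [pv_endswith_concat] at he; simpa using he
        subst hch
        have hm : PySem.Chars.isspace '-' = false := by decide
        have hsnoc := pv_split₀_snoc q '-' hm
        have hA : pvStepA (q ++ ['-']) piece = q ++ PySem.Chars.strip piece := by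
          simp only [pvStepA, hp', Bool.false_eq_true, if_false, he, if_true]
          rw [pv_lstrip_strip, List.dropLast_concat]
        constructor
        · rw [hA, hsnoc, hstrip, pv_split₀_append_word q c tp hc, hsp']
          simp [pvStepB, hw, pvGlue, pv_endswith_concat]
        · rw [hA, hstrip]
          right
          rw [pv_getLastD_append, List.getLastD_cons]
          rw [hstrip, List.getLastD_cons] at hlast
          exact hlast
    · by_cases ho : out.isEmpty
      · have hnil : out = [] := by simpa using ho
        subst hnil
        have hA : pvStepA [] piece = PySem.Chars.strip piece := by
          simp [pvStepA, hp', pv_endswith_nil]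
        constructor
        · rw [show PySem.Chars.split₀ ([] : List Char) = [] from rfl, hA, pv_split₀_strip]
          simp [pvStepB, hw]
        · rw [hA]
          right
          exact hlast
      · rcases out.eq_nil_or_concat with rfl | ⟨q, ch, rfl⟩
        · simp at ho
        · simp only [List.concat_eq_append] at *
          have hchs : PySem.Chars.isspace ch = false := by
            rcases hJ with h0 | h0
            · simp at h0
            · rw [List.getLastD_concat] at h0; exact h0
          have hchd : (ch == '-') = false := by
            by_cases hb : ch = '-'
            · subst hb
              rw [pv_endswith_concat] at he
              simp at he
            · simp [hb]
          have he' : PySem.Chars.endswith (q ++ [ch]) ['-'] = false := by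
            rw [pv_endswith_concat]; exact hchd
          have hsnoc := pv_split₀_snoc q ch hchs
          have hA : pvStepA (q ++ [ch]) piece =
              (q ++ [ch]) ++ ' ' :: PySem.Chars.strip piece := by
            simp [pvStepA, hp', he']
          constructor
          · rw [hA, pv_split₀_sep, pv_split₀_strip, hsnoc]
            simp [pvStepB, hw, pv_endswith_concat, hchd]
          · rw [hA, hstrip,
              show (q ++ [ch]) ++ ' ' :: c :: tp = ((q ++ [ch]) ++ [' ']) ++ c :: tp by simp]
            right
            rw [pv_getLastD_append, List.getLastD_cons]
            rw [hstrip, List.getLastD_cons] at hlast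
            exact hlast

theorem pv_loop (ps : List String) : ∀ out : List Char, pvJ out →
    ps.foldl (fun words piece => pvStepB words piece.toList) (PySem.Chars.split₀ out) =
      PySem.Chars.split₀ (ps.foldl (fun o piece => pvStepA o piece.toList) out) := by
  induction ps with
  | nil => intro out _; rfl
  | cons p ps ih =>
      intro out hJ
      obtain ⟨h1, h2⟩ := pv_step_eq out p.toList hJ
      simp only [List.foldl_cons, h1]
      exact ih _ h2

-- ===== VERDICT (by name: the statement is the Claim_ definition above) =====
theorem join_pieces_py_spec : Claim_equal_join_pieces_py := by
  intro pieces _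
  unfold Spec_join_pieces_py join_pieces_py join_pieces_py_alt
  have := pv_loop pieces [] (Or.inl rfl)
  rw [show PySem.Chars.split₀ ([] : List Char) = [] from rfl] at this
  rw [← this]
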